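-- pv_equiv track=rewrite | github.com/khj68/algorithm | CodingTest/2021kakao/enterprise/2.py | requestsServed
-- ===== SOURCE A (Python) =====
-- from bisect import bisect_right
--
-- def requestsServed(timestamp, top):
--     timestamp.sort()
--     top.sort()
--
--     cnt = 0
--
--     for t in top:
--         idx = bisect_right(timestamp, t)
--         if idx < 5:
--             timestamp = timestamp[idx:]
--             cnt += idx
--         else:
--             timestamp = timestamp[:idx-5] + timestamp[idx:]
--             cnt += 5
--
--
--     return cnt
-- ===== SOURCE B (Python) =====
-- def requestsServed(timestamp, top):
--     timestamp.sort()
--     top.sort()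
--     stack = []
--     i = 0
--     n = len(timestamp)
--     cnt = 0
--     for t in top:
--         while i < n and timestamp[i] <= t:
--             stack.append(timestamp[i])
--             i += 1
--         k = min(5, len(stack))
--         del stack[len(stack) - k:]
--         cnt += k
--     return cnt
-- ===== Notes on version B (the rewrite author's own statement) =====
-- stated objective: faster
-- what changed: Replaces the per-top bisect plus list-slicing rebuild of the remaining-timestamp list with a single pointer over the sorted timestamps and a stack from which up to 5 largest eligible entries are popped per top, so no list is ever copied.
import Mathlib
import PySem

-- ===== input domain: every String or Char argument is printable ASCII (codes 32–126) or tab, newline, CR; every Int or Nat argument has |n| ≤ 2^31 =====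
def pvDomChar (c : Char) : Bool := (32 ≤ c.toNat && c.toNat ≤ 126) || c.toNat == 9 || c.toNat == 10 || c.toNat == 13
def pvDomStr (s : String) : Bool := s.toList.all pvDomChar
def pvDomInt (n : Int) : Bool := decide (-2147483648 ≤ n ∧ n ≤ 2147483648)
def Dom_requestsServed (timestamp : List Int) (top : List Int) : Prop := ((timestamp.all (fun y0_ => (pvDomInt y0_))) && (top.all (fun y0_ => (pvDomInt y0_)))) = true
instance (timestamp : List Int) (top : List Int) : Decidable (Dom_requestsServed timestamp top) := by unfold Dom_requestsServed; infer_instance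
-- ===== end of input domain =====

-- B replaces A's per-top bisect + slice rebuilds by one pointer over the sorted timestamps
-- and a stack popped up to 5 per top (objective: faster). Both Pythons sort their argument
-- lists in place; the equivalence proved here is about the return value.

-- ===== PORT A =====
-- the for-loop over top, carrying the remaining timestamp list and cnt
def requestsServedGoA : List Int → List Int → Int → Int
  | [], _, cnt => cnt
  | t :: rest, ts, cnt =>
    let idx : Nat := PySem.List.bisectRight ts t
    if idx < 5 then
      requestsServedGoA rest (PySem.List.slice ts (some (idx : Int)) none) (cnt + (idx : Int))
    else
      requestsServedGoA rest
        (PySem.List.slice ts none (some ((idx : Int) - 5)) ++ PySem.List.slice ts (some (idx : Int)) none)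
        (cnt + 5)

def requestsServed (timestamp : List Int) (top : List Int) : Int :=
  requestsServedGoA (PySem.List.sorted top (fun x => x)) (PySem.List.sorted timestamp (fun x => x)) 0

-- ===== PORT B =====
-- the inner while-loop: move pending elements ≤ t onto the stack (stack head = most recent push)
def requestsServedPush (t : Int) : List Int → List Int → List Int × List Int
  | [], stack => ([], stack)
  | x :: xs, stack => if x ≤ t then requestsServedPush t xs (x :: stack) else (x :: xs, stack)

-- the for-loop over top, carrying (pending, stack, cnt); 'del stack[len-k:]' = drop k from the head
def requestsServedGoB : List Int → List Int → List Int → Int → Int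
  | [], _, _, cnt => cnt
  | t :: rest, pending, stack, cnt =>
    let ps := requestsServedPush t pending stack
    let k : Nat := min 5 ps.2.length
    requestsServedGoB rest ps.1 (ps.2.drop k) (cnt + (k : Int))

def requestsServed_alt (timestamp : List Int) (top : List Int) : Int :=
  requestsServedGoB (PySem.List.sorted top (fun x => x)) (PySem.List.sorted timestamp (fun x => x)) [] 0

-- ===== PRECONDITION & SPEC =====
def Spec_requestsServed (timestamp : List Int) (top : List Int) (out : Int) : Prop := out = requestsServed_alt timestamp top
instance (timestamp : List Int) (top : List Int) (out : Int) : Decidable (Spec_requestsServed timestamp top out) := by unfold Spec_requestsServed; infer_instance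

-- ===== CLAIM (what is proved, stated in full; the proofs are below) =====
def Claim_equal_requestsServed : Prop := ∀ (timestamp : List Int) (top : List Int), Dom_requestsServed timestamp top → Spec_requestsServed timestamp top (requestsServed timestamp top)

-- ===== LEMMAS AND PROOFS =====

-- elements strictly before the end of the takeWhile prefix satisfy the predicate
lemma tw_pred (p : Int → Bool) : ∀ (l : List Int) (j : Nat) (hj : j < l.length),
    j < (l.takeWhile p).length → p l[j] = true := by
  intro l
  induction l with
  | nil => intro j hj _; simp at hj
  | cons x xs ih =>
    intro j hj hlt
    by_cases hx : p x = true
    · cases j with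
      | zero => simpa using hx
      | succ n =>
        simp only [List.takeWhile_cons, hx, if_true, List.length_cons] at hlt
        simpa using ih n (by simpa using hj) (by omega)
    · simp [hx] at hlt

-- the element just past the takeWhile prefix (if any) fails the predicate
lemma tw_stop (p : Int → Bool) : ∀ (l : List Int) (j : Nat) (hj : j < l.length),
    j = (l.takeWhile p).length → p l[j] = false := by
  intro l
  induction l with
  | nil => intro j hj _; simp at hj
  | cons x xs ih =>
    intro j hj hje
    by_cases hx : p x = true
    · simp only [List.takeWhile_cons, hx, if_true, List.length_cons] at hje
      cases j with
      | zero => omega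
      | succ n => simpa using ih n (by simpa using hj) (by omega)
    · simp [hx] at hje
      subst hje
      simpa using hx

-- on a sorted list, bisect_right t counts the elements ≤ t
lemma bisectRight_eq_length_takeWhile (ts : List Int) (t : Int)
    (h : ts.Pairwise (· ≤ ·)) :
    PySem.List.bisectRight ts t = (ts.takeWhile (fun x => decide (x ≤ t))).length := by
  obtain ⟨hle, hlt, hgt⟩ := PySem.List.bisectRight_spec ts t h
  set n := PySem.List.bisectRight ts t with hn
  set m := (ts.takeWhile (fun x => decide (x ≤ t))).length with hm
  have hmle : m ≤ ts.length := by
    simpa [hm] using (List.takeWhile_sublist (l := ts) (fun x => decide (x ≤ t))).length_le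
  rcases lt_trichotomy n m with hlt' | he | hgt'
  · -- n < m : ts[n] ≤ t (it is in the takeWhile prefix) but the spec says t < ts[n]
    have hnl : n < ts.length := lt_of_lt_of_le hlt' hmle
    have h1 : t < ts[n] := hgt n hnl le_rfl
    have h2 : ts[n] ≤ t := by
      simpa using tw_pred (fun x => decide (x ≤ t)) ts n hnl (by omega)
    omega
  · exact he
  · -- m < n : the spec says ts[m] ≤ t, but takeWhile stopped at m
    have hml : m < ts.length := lt_of_lt_of_le hgt' hle
    have h1 : ts[m] ≤ t := hlt m hml hgt'
    have h2 : decide (ts[m] ≤ t) = false := tw_stop (fun x => decide (x ≤ t)) ts m hml hm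
    simp [h1] at h2

-- the while-loop moves exactly the ≤ t prefix of pending onto the stack
lemma push_eq (t : Int) (pending : List Int) : ∀ (stack : List Int),
    requestsServedPush t pending stack =
      (pending.dropWhile (fun x => decide (x ≤ t)),
       (pending.takeWhile (fun x => decide (x ≤ t))).reverse ++ stack) := by
  induction pending with
  | nil => intro stack; simp [requestsServedPush]
  | cons x xs ih =>
    intro stack
    by_cases hx : x ≤ t
    · simp [requestsServedPush, hx, ih]
    · simp [requestsServedPush, hx]

-- loop invariant: A's remaining list is stack.reverse ++ pending, it is sorted,
-- and every stacked element is ≤ every remaining top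
lemma go_eq (tops : List Int) : ∀ (stack pending : List Int) (cnt : Int),
    (stack.reverse ++ pending).Pairwise (· ≤ ·) →
    tops.Pairwise (· ≤ ·) →
    (∀ x ∈ stack, ∀ u ∈ tops, x ≤ u) →
    requestsServedGoA tops (stack.reverse ++ pending) cnt =
      requestsServedGoB tops pending stack cnt := by
  induction tops with
  | nil => intro stack pending cnt _ _ _; simp [requestsServedGoA, requestsServedGoB]
  | cons t rest ih =>
    intro stack pending cnt hsorted htops hstack
    have htopsrest : rest.Pairwise (· ≤ ·) := htops.of_cons
    have ht_le_rest : ∀ u ∈ rest, t ≤ u := (List.pairwise_cons.mp htops).1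
    set p : Int → Bool := fun x => decide (x ≤ t) with hp
    set P := pending.takeWhile p with hP
    set Q := pending.dropWhile p with hQ
    have hstackt : ∀ x ∈ stack, p x = true := by
      intro x hx; simpa [hp] using hstack x hx t (List.mem_cons_self)
    have hts : stack.reverse ++ pending = (stack.reverse ++ P) ++ Q := by
      rw [List.append_assoc, hP, hQ, List.takeWhile_append_dropWhile]
    have hlenSP : stack.length + P.length = (stack.reverse ++ P).length := by simp
    have htw : (stack.reverse ++ pending).takeWhile p = stack.reverse ++ P := by
      rw [List.takeWhile_append]
      have h1 : stack.reverse.takeWhile p = stack.reverse :=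
        List.takeWhile_eq_self_iff.mpr (by intro x hx; exact hstackt x (List.mem_reverse.mp hx))
      simp [h1, hP]
    have hidx : PySem.List.bisectRight (stack.reverse ++ pending) t
        = stack.length + P.length := by
      rw [bisectRight_eq_length_takeWhile _ _ hsorted, htw]; simp
    have hpush : requestsServedPush t pending stack = (Q, P.reverse ++ stack) := by
      rw [push_eq]
    have hlen : (P.reverse ++ stack).length = stack.length + P.length := by
      simp [Nat.add_comm]
    have hstack' : ∀ x ∈ P.reverse ++ stack, x ≤ t := by
      intro x hx
      rcases List.mem_append.mp hx with hx | hx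
      · have := List.mem_takeWhile_imp (List.mem_reverse.mp hx); simpa [hp] using this
      · simpa [hp] using hstackt x hx
    have hdropQ : (stack.reverse ++ pending).drop (stack.length + P.length) = Q := by
      rw [hts, hlenSP, List.drop_left]
    by_cases hcase : stack.length + P.length < 5
    · -- idx < 5 : everything ≤ t is served; the new stack is empty
      have hAstep : requestsServedGoA (t :: rest) (stack.reverse ++ pending) cnt
          = requestsServedGoA rest Q (cnt + ((stack.length + P.length : Nat) : Int)) := by
        rw [requestsServedGoA]
        simp only [hidx]
        rw [if_pos hcase, PySem.List.slice_from_natCast, hdropQ]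
      have hBstep : requestsServedGoB (t :: rest) pending stack cnt
          = requestsServedGoB rest Q [] (cnt + ((stack.length + P.length : Nat) : Int)) := by
        rw [requestsServedGoB]
        simp only [hpush, hlen]
        rw [Nat.min_eq_right (Nat.le_of_lt hcase)]
        congr 1
        apply List.drop_eq_nil_of_le
        simp [Nat.add_comm]
      rw [hAstep, hBstep]
      refine ih [] Q (cnt + ((stack.length + P.length : Nat) : Int))
        ?_ htopsrest (by intro x hx; simp at hx)
      simp only [List.reverse_nil, List.nil_append]
      refine List.Pairwise.sublist ?_ hsorted
      rw [hts]; exact List.sublist_append_right _ _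
    · -- idx ≥ 5 : the 5 largest remaining elements ≤ t are served
      have h5 : 5 ≤ stack.length + P.length := Nat.le_of_not_lt hcase
      set stack' := P.reverse ++ stack with hstk'
      have hrevdrop : (stack'.drop 5).reverse
          = (stack.reverse ++ P).take (stack.length + P.length - 5) := by
        rw [List.reverse_drop]
        have hr : stack'.reverse = stack.reverse ++ P := by simp [hstk']
        rw [hr]
        congr 1
        simp only [hstk', List.length_append, List.length_reverse]
        omega
      have hAstep : requestsServedGoA (t :: rest) (stack.reverse ++ pending) cnt
          = requestsServedGoA rest ((stack'.drop 5).reverse ++ Q) (cnt + 5) := by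
        rw [requestsServedGoA]
        simp only [hidx, if_neg hcase]
        congr 1
        have hsub : ((stack.length + P.length : Nat) : Int) - 5
            = ((stack.length + P.length - 5 : Nat) : Int) := by omega
        rw [hsub, PySem.List.slice_to_natCast, PySem.List.slice_from_natCast, hdropQ]
        have htake : (stack.reverse ++ pending).take (stack.length + P.length - 5)
            = (stack.reverse ++ P).take (stack.length + P.length - 5) := by
          rw [hts]
          exact List.take_append_of_le_length (by rw [← hlenSP]; omega)
        rw [htake, hrevdrop]
      have hBstep : requestsServedGoB (t :: rest) pending stack cnt
          = requestsServedGoB rest Q (stack'.drop 5) (cnt + 5) := by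
        rw [requestsServedGoB]
        simp only [hpush]
        have hk : min 5 stack'.length = 5 := by
          apply Nat.min_eq_left; rw [hstk', hlen]; omega
        rw [hk]
        norm_num
      rw [hAstep, hBstep]
      refine ih (stack'.drop 5) Q (cnt + 5) ?_ htopsrest ?_
      · refine List.Pairwise.sublist ?_ hsorted
        rw [hts, hrevdrop]
        exact List.Sublist.append (List.take_sublist _ _) (List.Sublist.refl _)
      · intro x hx u hu
        have hxt : x ≤ t := hstack' x (hstk' ▸ List.mem_of_mem_drop hx)
        exact le_trans hxt (ht_le_rest u hu)

-- ===== VERDICT (by name: the statement is the Claim_ definition above) =====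
theorem requestsServed_spec : Claim_equal_requestsServed := by
  intro timestamp top _
  unfold Spec_requestsServed requestsServed requestsServed_alt
  have := go_eq (PySem.List.sorted top (fun x => x)) []
    (PySem.List.sorted timestamp (fun x => x)) 0
  simp only [List.reverse_nil, List.nil_append] at this
  exact this (by simpa using PySem.List.sorted_pairwise timestamp (fun x => x))
    (by simpa using PySem.List.sorted_pairwise top (fun x => x))
    (by intro x hx; simp at hx)
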